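-- pv_equiv track=rewrite | github.com/javieruhk/RecipeManager | foodex2-phenol explorer matcher.py | create_foodex2_phenol_explorer_matches_dict
-- ===== SOURCE A (Python) =====
-- def create_foodex2_phenol_explorer_matches_dict(foodex2_name_list, phenol_explorer_names_dict):
-- 	foodex2_phenol_explorer_matches_dict = {}
-- 	maximum_matches = 0
--
-- 	for phenol_explorer_code in phenol_explorer_names_dict:
-- 		matches = 0
--
-- 		for word in foodex2_name_list:
-- 			if word in phenol_explorer_names_dict[phenol_explorer_code]:
-- 				matches = matches+1
--
-- 		if matches > maximum_matches:
-- 			maximum_matches = matches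
-- 			foodex2_phenol_explorer_matches_dict = {phenol_explorer_code: phenol_explorer_names_dict[phenol_explorer_code]}
-- 		elif matches == maximum_matches and maximum_matches != 0:
-- 			foodex2_phenol_explorer_matches_dict[phenol_explorer_code] = phenol_explorer_names_dict[phenol_explorer_code]
--
-- 	return foodex2_phenol_explorer_matches_dict
-- ===== SOURCE B (Python) =====
-- def create_foodex2_phenol_explorer_matches_dict(foodex2_name_list, phenol_explorer_names_dict):
-- 	counts = {code: sum(1 for word in foodex2_name_list if word in names)
-- 	          for code, names in phenol_explorer_names_dict.items()}
-- 	best = max(counts.values(), default=0)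
-- 	if best == 0:
-- 		return {}
-- 	return {code: names for code, names in phenol_explorer_names_dict.items()
-- 	        if counts[code] == best}
-- ===== Notes on version B (the rewrite author's own statement) =====
-- stated objective: simpler
-- what changed: Replaces A's single pass with a running maximum and a dict that is reset whenever the maximum grows by a tabulate-then-filter decomposition: count overlaps per code, take the global maximum (default 0), and keep every code attaining it in one filtering comprehension.
import Mathlib
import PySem

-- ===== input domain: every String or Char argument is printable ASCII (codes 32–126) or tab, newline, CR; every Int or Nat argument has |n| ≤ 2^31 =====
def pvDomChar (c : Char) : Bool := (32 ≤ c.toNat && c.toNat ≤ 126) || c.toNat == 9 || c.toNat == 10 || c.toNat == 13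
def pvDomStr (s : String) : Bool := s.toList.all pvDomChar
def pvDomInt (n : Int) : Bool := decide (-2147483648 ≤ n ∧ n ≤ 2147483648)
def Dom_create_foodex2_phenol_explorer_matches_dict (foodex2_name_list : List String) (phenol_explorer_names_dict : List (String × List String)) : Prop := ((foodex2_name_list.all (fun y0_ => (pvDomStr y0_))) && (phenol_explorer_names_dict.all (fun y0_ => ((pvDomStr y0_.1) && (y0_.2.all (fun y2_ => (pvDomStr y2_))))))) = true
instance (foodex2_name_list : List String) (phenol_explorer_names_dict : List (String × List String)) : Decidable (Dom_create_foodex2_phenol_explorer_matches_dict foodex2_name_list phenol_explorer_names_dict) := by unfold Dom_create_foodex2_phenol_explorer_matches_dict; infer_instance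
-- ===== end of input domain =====

-- B replaces A's running-max-with-reset single pass by a tabulate-then-filter decomposition (count per code,
-- global maximum with default 0, filter the codes attaining it); objective: simpler. Same cost.

-- ===== PORT A =====
-- The Python dict argument arrives as an association list; 'dict[code]' is the first-match lookup
-- (exact under Pre_: unique codes), and iterating the list is iterating the dict's keys with their values.
def create_foodex2_phenol_explorer_matches_dict (foodex2_name_list : List String) (phenol_explorer_names_dict : List (String × List String)) : List (String × List String) :=
  (phenol_explorer_names_dict.foldl
    (fun (st : PySem.Dict String (List String) × Int) kv =>
      let names := (PySem.Dict.mk phenol_explorer_names_dict).getD kv.1 []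
      let mtch := foodex2_name_list.foldl (fun m w => if w ∈ names then m + 1 else m) (0 : Int)
      if mtch > st.2 then
        ((PySem.Dict.empty.insert kv.1 names), mtch)
      else if mtch == st.2 && st.2 != 0 then
        (st.1.insert kv.1 names, st.2)
      else st)
    ((PySem.Dict.empty : PySem.Dict String (List String)), (0 : Int))).1.items

-- ===== PORT B =====
-- counts[code] never misses (every code is a key of counts), so that lookup is ported as getD with default 0.
def create_foodex2_phenol_explorer_matches_dict_alt (foodex2_name_list : List String) (phenol_explorer_names_dict : List (String × List String)) : List (String × List String) :=
  let counts : PySem.Dict String Int :=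
    PySem.Dict.ofList (phenol_explorer_names_dict.map
      (fun kv => (kv.1, (foodex2_name_list.map (fun w => if w ∈ kv.2 then (1 : Int) else 0)).sum)))
  let best := PySem.List.maxD counts.values (fun v => v) 0
  if best == 0 then []
  else (PySem.Dict.ofList (phenol_explorer_names_dict.filter
         (fun kv => counts.getD kv.1 0 == best))).items

-- ===== PRECONDITION & SPEC =====
-- Pre_ excludes association lists with duplicate codes: there the Python dict collapses entries
-- (later values overwrite earlier ones) and the association-list reading of the input is ambiguous.
def Pre_create_foodex2_phenol_explorer_matches_dict (foodex2_name_list : List String) (phenol_explorer_names_dict : List (String × List String)) : Prop :=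
  (phenol_explorer_names_dict.map Prod.fst).Nodup
instance (foodex2_name_list : List String) (phenol_explorer_names_dict : List (String × List String)) : Decidable (Pre_create_foodex2_phenol_explorer_matches_dict foodex2_name_list phenol_explorer_names_dict) := by unfold Pre_create_foodex2_phenol_explorer_matches_dict; infer_instance

def pvWitness_create_foodex2_phenol_explorer_matches_dict : List String × (List (String × List String)) :=
  (["apple", "pie"], [("c1", ["apple", "tart"]), ("c2", ["banana"])])

def Spec_create_foodex2_phenol_explorer_matches_dict (foodex2_name_list : List String) (phenol_explorer_names_dict : List (String × List String)) (out : List (String × List String)) : Prop := out = create_foodex2_phenol_explorer_matches_dict_alt foodex2_name_list phenol_explorer_names_dict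
instance (foodex2_name_list : List String) (phenol_explorer_names_dict : List (String × List String)) (out : List (String × List String)) : Decidable (Spec_create_foodex2_phenol_explorer_matches_dict foodex2_name_list phenol_explorer_names_dict out) := by unfold Spec_create_foodex2_phenol_explorer_matches_dict; infer_instance

-- ===== CLAIM (what is proved, stated in full; the proofs are below) =====
def Claim_equal_create_foodex2_phenol_explorer_matches_dict : Prop := ∀ (foodex2_name_list : List String) (phenol_explorer_names_dict : List (String × List String)), Dom_create_foodex2_phenol_explorer_matches_dict foodex2_name_list phenol_explorer_names_dict → Pre_create_foodex2_phenol_explorer_matches_dict foodex2_name_list phenol_explorer_names_dict → Spec_create_foodex2_phenol_explorer_matches_dict foodex2_name_list phenol_explorer_names_dict (create_foodex2_phenol_explorer_matches_dict foodex2_name_list phenol_explorer_names_dict)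

-- ===== LEMMAS AND PROOFS =====

-- the word-overlap count of one code
def pvCnt (fx : List String) (kv : String × List String) : Int :=
  ((fx.countP (fun w => decide (w ∈ kv.2))) : Int)

theorem pvCnt_nonneg (fx : List String) (kv : String × List String) : 0 ≤ pvCnt fx kv := by
  simp [pvCnt]

-- A's loop body with the dict lookups already resolved to the pair's own value
def pvStep (fx : List String) : PySem.Dict String (List String) × Int → (String × List String) → PySem.Dict String (List String) × Int :=
  fun st kv =>
    if pvCnt fx kv > st.2 then (PySem.Dict.empty.insert kv.1 kv.2, pvCnt fx kv)
    else if pvCnt fx kv == st.2 && st.2 != 0 then (st.1.insert kv.1 kv.2, st.2)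
    else st

-- invariant of A's loop: the dict holds exactly the already-seen codes attaining the running maximum
theorem pvRunA (fx : List String) (l : List (String × List String))
    (d : PySem.Dict String (List String)) (m : Int) (hm : 0 ≤ m)
    (hnd : (d.keys ++ l.map Prod.fst).Nodup) :
    (l.foldl (pvStep fx) (d, m)).1.items =
      (if m < l.foldl (fun b kv => max b (pvCnt fx kv)) m then
        l.filter (fun kv => pvCnt fx kv == l.foldl (fun b kv => max b (pvCnt fx kv)) m)
      else if m ≠ 0 then d.items ++ l.filter (fun kv => pvCnt fx kv == m)
      else d.items)
    ∧ (l.foldl (pvStep fx) (d, m)).2 = l.foldl (fun b kv => max b (pvCnt fx kv)) m := by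
  induction l generalizing d m with
  | nil => simp
  | cons kv t ih =>
    have hc : 0 ≤ pvCnt fx kv := pvCnt_nonneg fx kv
    simp only [List.foldl_cons]
    simp only [List.map_cons] at hnd
    by_cases hgt : pvCnt fx kv > m
    · -- reset branch
      have hstep : pvStep fx (d, m) kv = (PySem.Dict.empty.insert kv.1 kv.2, pvCnt fx kv) := by
        simp [pvStep, hgt]
      rw [hstep]
      have hmax : max m (pvCnt fx kv) = pvCnt fx kv := max_eq_right (le_of_lt hgt)
      rw [hmax]
      have hnd' : ((PySem.Dict.empty.insert kv.1 kv.2 : PySem.Dict String (List String)).keys ++ t.map Prod.fst).Nodup := by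
        have hsub : (kv.1 :: t.map Prod.fst).Sublist (d.keys ++ kv.1 :: t.map Prod.fst) :=
          List.sublist_append_right _ _
        have h1 : (kv.1 :: t.map Prod.fst).Nodup := hnd.sublist hsub
        simpa [PySem.Dict.keys, PySem.Dict.empty, PySem.Dict.insert] using h1
      obtain ⟨ih1, ih2⟩ := ih (PySem.Dict.empty.insert kv.1 kv.2) (pvCnt fx kv) hc hnd'
      have hcM : pvCnt fx kv ≤ t.foldl (fun b kv => max b (pvCnt fx kv)) (pvCnt fx kv) :=
        (PySem.List.le_foldl_max_int t (pvCnt fx) (pvCnt fx kv)).1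
      have hmM : m < t.foldl (fun b kv => max b (pvCnt fx kv)) (pvCnt fx kv) := lt_of_lt_of_le hgt hcM
      refine ⟨?_, ih2⟩
      rw [if_pos hmM]
      by_cases hlt : pvCnt fx kv < t.foldl (fun b kv => max b (pvCnt fx kv)) (pvCnt fx kv)
      · rw [ih1, if_pos hlt]
        have : (pvCnt fx kv == t.foldl (fun b kv => max b (pvCnt fx kv)) (pvCnt fx kv)) = false := by
          simpa using ne_of_lt hlt
        simp [this]
      · have hMc : t.foldl (fun b kv => max b (pvCnt fx kv)) (pvCnt fx kv) = pvCnt fx kv :=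
          le_antisymm (not_lt.mp hlt) hcM
        have hne0 : ¬ (pvCnt fx kv = 0) := by omega
        rw [ih1, if_neg hlt, if_pos (by simpa [hMc] using hne0), hMc]
        have hitems : (PySem.Dict.empty.insert kv.1 kv.2 : PySem.Dict String (List String)).items = [kv] := rfl
        rw [hitems]
        simp
    · -- no reset
      by_cases hcm : pvCnt fx kv = m ∧ m ≠ 0
      · obtain ⟨hceq, hm0⟩ := hcm
        have hstep : pvStep fx (d, m) kv = (d.insert kv.1 kv.2, m) := by
          simp [pvStep, hceq, hm0]
        rw [hstep]
        have hmax : max m (pvCnt fx kv) = m := max_eq_left (not_lt.mp hgt)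
        rw [hmax]
        have hnotmem : kv.1 ∉ d.keys := by
          intro hmem
          have := (List.nodup_append.mp hnd).2.2
          exact this kv.1 hmem kv.1 (by simp) rfl
        have hco : d.contains kv.1 = false := by
          rcases Bool.eq_false_or_eq_true (d.contains kv.1) with h' | h'
          · exact absurd ((PySem.Dict.contains_iff_mem_keys d kv.1).mp h') hnotmem
          · exact h'
        have hitems : (d.insert kv.1 kv.2).items = d.items ++ [kv] := by
          simpa using PySem.Dict.items_insert_of_not_contains d kv.2 hco
        have hkeys : (d.insert kv.1 kv.2).keys = d.keys ++ [kv.1] :=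
          PySem.Dict.keys_insert_of_not_contains d kv.2 hco
        have hnd' : ((d.insert kv.1 kv.2).keys ++ t.map Prod.fst).Nodup := by
          rw [hkeys]; simpa [List.append_assoc] using hnd
        obtain ⟨ih1, ih2⟩ := ih (d.insert kv.1 kv.2) m hm hnd'
        refine ⟨?_, ih2⟩
        by_cases hlt : m < t.foldl (fun b kv => max b (pvCnt fx kv)) m
        · rw [if_pos hlt, ih1, if_pos hlt]
          have : (pvCnt fx kv == t.foldl (fun b kv => max b (pvCnt fx kv)) m) = false := by
            simpa [hceq] using ne_of_lt hlt
          simp [this]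
        · rw [if_neg hlt, ih1, if_neg hlt, if_pos hm0, if_pos hm0, hitems]
          have : (pvCnt fx kv == m) = true := by simpa using hceq
          simp [this]
      · have hstep : pvStep fx (d, m) kv = (d, m) := by
          by_cases hm0 : m = 0
          · have hc0 : pvCnt fx kv = 0 := by omega
            simp [pvStep, hc0, hm0]
          · have hcne : ¬ (pvCnt fx kv = m) := fun h => hcm ⟨h, hm0⟩
            simp [pvStep, hgt, hcne]
        rw [hstep]
        have hmax : max m (pvCnt fx kv) = m := max_eq_left (not_lt.mp hgt)
        rw [hmax]
        have hnd'' : (d.keys ++ t.map Prod.fst).Nodup := by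
          refine hnd.sublist ?_
          exact (List.Sublist.refl d.keys).append ((List.sublist_cons_self kv.1 (t.map Prod.fst)))
        obtain ⟨ih1, ih2⟩ := ih d m hm hnd''
        refine ⟨?_, ih2⟩
        by_cases hlt : m < t.foldl (fun b kv => max b (pvCnt fx kv)) m
        · rw [if_pos hlt, ih1, if_pos hlt]
          have : (pvCnt fx kv == t.foldl (fun b kv => max b (pvCnt fx kv)) m) = false := by
            have : pvCnt fx kv < t.foldl (fun b kv => max b (pvCnt fx kv)) m :=
              lt_of_le_of_lt (not_lt.mp hgt) hlt
            simpa using ne_of_lt this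
          simp [this]
        · rw [if_neg hlt, ih1, if_neg hlt]
          by_cases hm0 : m = 0
          · simp [hm0]
          · rw [if_pos hm0, if_pos hm0]
            have hcne : (pvCnt fx kv == m) = false := by
              simpa using fun h => hcm ⟨h, hm0⟩
            simp [hcne]

-- A's inner counting loop is pvCnt
theorem pvInner_eq_cnt (fx : List String) (ns : List String) :
    fx.foldl (fun m w => if w ∈ ns then m + 1 else m) (0 : Int) = pvCnt fx ("", ns) := by
  simpa [pvCnt] using PySem.List.foldl_count_if (fun w => decide (w ∈ ns)) fx 0

-- A computes: the codes attaining the positive maximum overlap, else nothing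
theorem pvA_closed (fx : List String) (ph : List (String × List String))
    (hnd : (ph.map Prod.fst).Nodup) :
    create_foodex2_phenol_explorer_matches_dict fx ph =
      (if 0 < ph.foldl (fun b kv => max b (pvCnt fx kv)) (0 : Int) then
        ph.filter (fun kv => pvCnt fx kv == ph.foldl (fun b kv => max b (pvCnt fx kv)) (0 : Int))
      else []) := by
  have hcong : ∀ (st : PySem.Dict String (List String) × Int) (kv : String × List String), kv ∈ ph →
      (fun (st : PySem.Dict String (List String) × Int) kv =>
        let names := (PySem.Dict.mk ph).getD kv.1 []
        let mtch := fx.foldl (fun m w => if w ∈ names then m + 1 else m) (0 : Int)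
        if mtch > st.2 then ((PySem.Dict.empty.insert kv.1 names), mtch)
        else if mtch == st.2 && st.2 != 0 then (st.1.insert kv.1 names, st.2)
        else st) st kv = pvStep fx st kv := by
    intro st kv hmem
    have hitems : (kv.1, kv.2) ∈ (PySem.Dict.mk ph).items := by simpa using hmem
    have hkeysnd : (PySem.Dict.mk ph).keys.Nodup := by simpa [PySem.Dict.keys_mk] using hnd
    have hnames : (PySem.Dict.mk ph).getD kv.1 [] = kv.2 :=
      PySem.Dict.getD_of_mem_items _ hitems hkeysnd []
    have hcnt : fx.foldl (fun m w => if w ∈ kv.2 then m + 1 else m) (0 : Int) = pvCnt fx kv := by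
      simpa [pvCnt] using pvInner_eq_cnt fx kv.2
    simp only [hnames, hcnt, pvStep]
  have hfold := PySem.List.foldl_congr_mem ph _ (pvStep fx)
    ((PySem.Dict.empty : PySem.Dict String (List String)), (0 : Int)) hcong
  have hrun := pvRunA fx ph (PySem.Dict.empty) 0 le_rfl
    (by simpa [PySem.Dict.keys, PySem.Dict.empty] using hnd)
  rw [create_foodex2_phenol_explorer_matches_dict, hfold, hrun.1]
  simp [PySem.Dict.empty]

-- updating a dict with fresh distinct keys appends the pairs
theorem pvUpdate_items_of_fresh {κ ν : Type} [BEq κ] [LawfulBEq κ]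
    (l : List (κ × ν)) (d : PySem.Dict κ ν)
    (h : (d.keys ++ l.map Prod.fst).Nodup) :
    (d.update l).items = d.items ++ l := by
  induction l generalizing d with
  | nil => simp [PySem.Dict.update]
  | cons p t ih =>
    have hnotmem : p.1 ∉ d.keys := by
      intro hm
      have := (List.nodup_append.mp h).2.2
      exact this p.1 hm p.1 (by simp) rfl
    have hco : d.contains p.1 = false := by
      rcases Bool.eq_false_or_eq_true (d.contains p.1) with h' | h'
      · exact absurd ((PySem.Dict.contains_iff_mem_keys d p.1).mp h') hnotmem
      · exact h'
    have hstep : (d.insert p.1 p.2).items = d.items ++ [p] := by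
      simpa using PySem.Dict.items_insert_of_not_contains d p.2 hco
    have hkeys : (d.insert p.1 p.2).keys = d.keys ++ [p.1] :=
      PySem.Dict.keys_insert_of_not_contains d p.2 hco
    have h' : ((d.insert p.1 p.2).keys ++ t.map Prod.fst).Nodup := by
      rw [hkeys]
      simpa [List.append_assoc] using h
    have := ih (d.insert p.1 p.2) h'
    calc (d.update (p :: t)).items = ((d.insert p.1 p.2).update t).items := rfl
      _ = (d.insert p.1 p.2).items ++ t := this
      _ = d.items ++ (p :: t) := by rw [hstep]; simp

theorem pvOfList_items_of_nodup {κ ν : Type} [BEq κ] [LawfulBEq κ]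
    (l : List (κ × ν)) (h : (l.map Prod.fst).Nodup) :
    (PySem.Dict.ofList l).items = l := by
  have := pvUpdate_items_of_fresh l (PySem.Dict.empty : PySem.Dict κ ν)
    (by simpa [PySem.Dict.keys, PySem.Dict.empty] using h)
  simpa [PySem.Dict.ofList, PySem.Dict.empty] using this

-- B computes the same closed form
theorem pvB_closed (fx : List String) (ph : List (String × List String))
    (hnd : (ph.map Prod.fst).Nodup) :
    create_foodex2_phenol_explorer_matches_dict_alt fx ph =
      (if 0 < ph.foldl (fun b kv => max b (pvCnt fx kv)) (0 : Int) then
        ph.filter (fun kv => pvCnt fx kv == ph.foldl (fun b kv => max b (pvCnt fx kv)) (0 : Int))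
      else []) := by
  have hmapfun : (fun kv : String × List String =>
      (kv.1, (fx.map (fun w => if w ∈ kv.2 then (1 : Int) else 0)).sum)) =
      fun kv => (kv.1, pvCnt fx kv) := by
    funext kv
    have := PySem.List.sum_map_ite_one_zero (fun w => decide (w ∈ kv.2)) fx
    simp only [pvCnt]
    simpa using this
  have hclkeys : ((ph.map (fun kv => (kv.1, pvCnt fx kv))).map Prod.fst).Nodup := by
    simpa [List.map_map, Function.comp] using hnd
  have hitems : (PySem.Dict.ofList (ph.map (fun kv => (kv.1, pvCnt fx kv)))).items =
      ph.map (fun kv => (kv.1, pvCnt fx kv)) :=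
    pvOfList_items_of_nodup _ hclkeys
  set counts := PySem.Dict.ofList (ph.map (fun kv => (kv.1, pvCnt fx kv))) with hcounts
  have hvals : counts.values = ph.map (pvCnt fx) := by
    simp [PySem.Dict.values, hitems, List.map_map, Function.comp]
  set M := ph.foldl (fun b kv => max b (pvCnt fx kv)) (0 : Int) with hM
  have hM0 : 0 ≤ M := (PySem.List.le_foldl_max_int ph (pvCnt fx) 0).1
  have hbest : PySem.List.maxD counts.values (fun v => v) 0 = M := by
    rw [hvals]
    cases ph with
    | nil => simp [PySem.List.maxD, PySem.List.max?, hM]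
    | cons kv t =>
      rw [List.map_cons]
      have h1 : PySem.List.maxD (pvCnt fx kv :: t.map (pvCnt fx)) (fun v => v) 0 =
          (t.map (pvCnt fx)).foldl max (pvCnt fx kv) := by
        simp [PySem.List.maxD, PySem.List.max?_id_cons]
      rw [h1, hM, List.foldl_cons, List.foldl_map]
      rw [max_eq_right (pvCnt_nonneg fx kv)]
  have hgetD : ∀ kv ∈ ph, counts.getD kv.1 0 = pvCnt fx kv := by
    intro kv hmem
    have hin : (kv.1, pvCnt fx kv) ∈ counts.items := by
      rw [hitems]
      exact List.mem_map.mpr ⟨kv, hmem, rfl⟩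
    have hknd : counts.keys.Nodup := by
      simpa [PySem.Dict.keys, hitems] using hclkeys
    exact PySem.Dict.getD_of_mem_items _ hin hknd 0
  rw [create_foodex2_phenol_explorer_matches_dict_alt]
  simp only [hmapfun, ← hcounts, hbest]
  by_cases hMz : M = 0
  · simp [hMz]
  · have hpos : 0 < M := lt_of_le_of_ne hM0 (Ne.symm hMz)
    rw [if_neg (by simpa using hMz), if_pos hpos]
    have hfiltereq : ph.filter (fun kv => counts.getD kv.1 0 == M) =
        ph.filter (fun kv => pvCnt fx kv == M) :=
      List.filter_congr (fun kv hmem => by rw [hgetD kv hmem])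
    rw [hfiltereq]
    apply pvOfList_items_of_nodup
    exact hnd.sublist (List.Sublist.map Prod.fst (List.filter_sublist (l := ph)))

-- ===== VERDICT (by name: the statement is the Claim_ definition above) =====
theorem create_foodex2_phenol_explorer_matches_dict_spec : Claim_equal_create_foodex2_phenol_explorer_matches_dict := by
  intro fx ph _ hpre
  unfold Spec_create_foodex2_phenol_explorer_matches_dict
  rw [pvA_closed fx ph hpre, pvB_closed fx ph hpre]
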